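-- pv_equiv track=rewrite | github.com/thealper2/codewars-solutions | 7-kyu/send_in_the_clones.py | clonewars
-- ===== SOURCE A (Python) =====
-- def clonewars(kata_per_day):
--     if kata_per_day == 0:
--         return [1, 0]
--
--     num_clones = 2 ** (kata_per_day - 1)
--     total_attacks = 0
--
--     for i in range(1, kata_per_day + 1):
--         total_attacks += i * (2 ** (kata_per_day - i))
--
--     return [num_clones, total_attacks]
-- ===== SOURCE B (Python) =====
-- def clonewars(kata_per_day):
--     if kata_per_day == 0:
--         return [1, 0]
--     return [1 << (kata_per_day - 1), (1 << (kata_per_day + 1)) - kata_per_day - 2]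
-- ===== Notes on version B (the rewrite author's own statement) =====
-- stated objective: faster
-- what changed: Replaced the O(n) loop of repeated big-integer exponentiations with the closed form 2^(n+1)-n-2 computed by two shifts.
-- outside the precondition, e.g. on clonewars(-1): A returns [0.25, 0], B raises ValueError
import Mathlib
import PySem

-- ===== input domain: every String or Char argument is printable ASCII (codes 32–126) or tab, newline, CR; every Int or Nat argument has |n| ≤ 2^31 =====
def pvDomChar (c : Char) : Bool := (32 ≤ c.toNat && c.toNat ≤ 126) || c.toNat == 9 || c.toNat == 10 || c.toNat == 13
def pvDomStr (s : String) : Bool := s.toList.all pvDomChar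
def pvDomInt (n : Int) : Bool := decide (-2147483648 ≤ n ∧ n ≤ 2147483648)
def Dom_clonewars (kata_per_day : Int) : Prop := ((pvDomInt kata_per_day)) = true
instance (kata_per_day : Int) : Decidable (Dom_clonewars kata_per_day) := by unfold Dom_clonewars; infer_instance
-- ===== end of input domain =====

-- B replaces the loop of exponentiations with the closed form 2^(n+1)-n-2 (faster).


-- ===== PORT A =====
def clonewars (kata_per_day : Int) : List Int :=
  if kata_per_day == 0 then [1, 0]
  else
    let num_clones : Int := 2 ^ (kata_per_day - 1).toNat
    let total_attacks : Int :=
      (PySem.List.pyRange 1 (kata_per_day + 1) 1).foldl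
        (fun acc i => acc + i * 2 ^ (kata_per_day - i).toNat) 0
    [num_clones, total_attacks]

-- ===== PORT B =====
def clonewars_alt (kata_per_day : Int) : List Int :=
  if kata_per_day == 0 then [1, 0]
  else [2 ^ (kata_per_day - 1).toNat, 2 ^ (kata_per_day + 1).toNat - kata_per_day - 2]

-- ===== PRECONDITION & SPEC =====
-- Pre_ excludes negative kata_per_day, on which A's '2 ** (kata_per_day - 1)' yields a float
-- (e.g. [0.25, 0] at -1), not a value of the declared int-list type (B raises there).
def Pre_clonewars (kata_per_day : Int) : Prop := 0 ≤ kata_per_day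
instance (kata_per_day : Int) : Decidable (Pre_clonewars kata_per_day) := by unfold Pre_clonewars; infer_instance
def pvWitness_clonewars : Int := 5
def Spec_clonewars (kata_per_day : Int) (out : List Int) : Prop := out = clonewars_alt kata_per_day
instance (kata_per_day : Int) (out : List Int) : Decidable (Spec_clonewars kata_per_day out) := by unfold Spec_clonewars; infer_instance

-- ===== CLAIM (what is proved, stated in full; the proofs are below) =====
def Claim_equal_clonewars : Prop := ∀ (kata_per_day : Int), Dom_clonewars kata_per_day → Pre_clonewars kata_per_day → Spec_clonewars kata_per_day (clonewars kata_per_day)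

-- ===== LEMMAS AND PROOFS =====

-- the closed form of the weighted sum, over Nat m
theorem clonewars_sum_closed (m : Nat) :
    ((List.range m).map (fun k : Nat => (1 + (k : Int)) * 2 ^ (m - 1 - k))).sum
      = 2 ^ (m + 1) - (m : Int) - 2 := by
  induction m with
  | zero => simp
  | succ m ih =>
    rw [List.range_succ, List.map_append, List.sum_append]
    have hcongr : (List.range m).map (fun k : Nat => (1 + (k : Int)) * 2 ^ (m + 1 - 1 - k))
        = (List.range m).map (fun k : Nat => 2 * ((1 + (k : Int)) * 2 ^ (m - 1 - k))) := by
      refine List.map_congr_left (fun k hk => ?_)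
      have hkm : k < m := List.mem_range.mp hk
      have h1 : m + 1 - 1 - k = (m - 1 - k) + 1 := by omega
      rw [h1, pow_succ]; ring
    rw [hcongr, List.sum_map_mul_left, ih]
    simp only [List.map_cons, List.sum_cons, List.map_nil, List.sum_nil, Nat.succ_sub_one, Nat.sub_self]
    push_cast
    rw [pow_succ, pow_succ]
    ring

theorem clonewars_foldl_eq (n : Int) (hn : 0 ≤ n) :
    (PySem.List.pyRange 1 (n + 1) 1).foldl
        (fun acc i => acc + i * 2 ^ (n - i).toNat) 0
      = 2 ^ (n.toNat + 1) - n - 2 := by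
  rw [PySem.List.foldl_add, PySem.List.pyRange_one, List.map_map]
  have hlen : ((n + 1 - 1).toNat) = n.toNat := by omega
  rw [hlen]
  have hmap : (List.range n.toNat).map ((fun i => i * 2 ^ (n - i).toNat) ∘ fun k : Nat => (1 : Int) + (k : Int))
      = (List.range n.toNat).map (fun k : Nat => (1 + (k : Int)) * 2 ^ (n.toNat - 1 - k)) := by
    refine List.map_congr_left (fun k _ => ?_)
    simp only [Function.comp]
    have h2 : (n - (1 + (k : Int))).toNat = n.toNat - 1 - k := by omega
    rw [h2]
  rw [hmap, clonewars_sum_closed]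
  push_cast [Int.toNat_of_nonneg hn]
  ring

-- ===== VERDICT (by name: the statement is the Claim_ definition above) =====
theorem clonewars_spec : Claim_equal_clonewars := by
  intro n _ hpre
  unfold Spec_clonewars clonewars clonewars_alt
  by_cases h0 : n = 0
  · simp [h0]
  · have hne : (n == 0) = false := by simp [h0]
    simp only [hne, Bool.false_eq_true, if_false]
    have hn : 0 ≤ n := hpre
    rw [clonewars_foldl_eq n hn]
    have : (n + 1).toNat = n.toNat + 1 := by omega
    rw [this]
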